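-- pv_equiv track=rewrite | github.com/thealper2/codewars-solutions | 7-kyu/isbn_corruption.py | fix_code
-- ===== SOURCE A (Python) =====
-- def fix_code(isbn):
--     total = 0
--     missing_index = -1
--     for i, char in enumerate(isbn):
--         if char == '?':
--             missing_index = i
--         else:
--             if char == 'X':
--                 digit = 10
--             else:
--                 digit = int(char)
--
--             total += digit * (10 - i)
--
--     if missing_index == -1:
--         return ''
--
--     for d in range(0, 11):
--         temp_total = total + d * (10 - missing_index)
--         if temp_total % 11 == 0:
--             if d == 10:
--                 return 'X'
--             else:
--                 return str(d)
--
--     return ''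
-- ===== SOURCE B (Python) =====
-- def _solve(total, w):
--     # solve total + d*w == 0 (mod 11) for d in 0..10 directly
--     w %= 11
--     if w == 0:
--         return '0' if total % 11 == 0 else ''
--     d = -total * pow(w, 9, 11) % 11   # w^9 = w^-1 mod 11 (Fermat)
--     return 'X' if d == 10 else str(d)
--
-- def fix_code(isbn):
--     total = sum((10 if c == 'X' else int(c)) * (10 - i)
--                 for i, c in enumerate(isbn) if c != '?')
--     missing_index = isbn.rfind('?')
--     if missing_index == -1:
--         return ''
--     return _solve(total, 10 - missing_index)
-- ===== Notes on version B (the rewrite author's own statement) =====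
-- stated objective: alternative
-- what changed: B replaces A's brute-force search over d = 0..10 with a direct modular solve d = -total * w^-1 (mod 11), computing the inverse of the weight w by Fermat's little theorem via pow(w, 9, 11) and handling a weight divisible by 11 explicitly; the running total and the last placeholder position come from a comprehension sum and str.rfind instead of A's stateful loop.
import Mathlib
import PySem

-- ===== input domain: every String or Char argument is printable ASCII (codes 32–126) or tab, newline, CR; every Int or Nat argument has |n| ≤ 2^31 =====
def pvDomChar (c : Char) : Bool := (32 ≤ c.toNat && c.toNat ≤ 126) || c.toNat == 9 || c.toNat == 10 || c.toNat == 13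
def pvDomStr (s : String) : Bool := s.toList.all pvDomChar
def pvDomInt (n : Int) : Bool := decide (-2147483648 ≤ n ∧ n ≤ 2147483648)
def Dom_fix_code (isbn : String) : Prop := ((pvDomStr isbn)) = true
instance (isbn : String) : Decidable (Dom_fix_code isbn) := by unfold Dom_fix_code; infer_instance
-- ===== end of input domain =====

-- B replaces A's brute-force search over d = 0..10 by a direct modular solve
-- (d = -total * w^-1 mod 11, inverse via Fermat): objective 'alternative'.

-- ===== PORT A =====
-- the body of A's 'for i, char in enumerate(isbn)' loop, state = (total, missing_index)
def pvAStep (st : Int × Int) (p : Int × Char) : Int × Int :=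
  if p.2 = '?' then (st.1, p.1)
  else
    let digit : Int := if p.2 = 'X' then 10 else (PySem.Int.ofChars? [p.2]).getD 0
    (st.1 + digit * (10 - p.1), st.2)

-- A's 'for d in range(0, 11)' loop; w stands for (10 - missing_index)
def pvASearch (total w : Int) : List Int → String
  | [] => ""
  | d :: rest =>
      if PySem.Int.mod (total + d * w) 11 = 0 then
        (if d = 10 then "X" else PySem.Int.toStr d)
      else pvASearch total w rest

def fix_code (isbn : String) : String :=
  let st := (PySem.List.enumerate isbn.toList 0).foldl pvAStep (0, -1)
  if st.2 = -1 then ""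
  else pvASearch st.1 (10 - st.2) (PySem.List.pyRange 0 11 1)

-- ===== PORT B =====
-- Source B's _solve(total, w)
def pvBSolve (total w : Int) : String :=
  let w' := PySem.Int.mod w 11
  if w' = 0 then (if PySem.Int.mod total 11 = 0 then "0" else "")
  else
    let d := PySem.Int.mod (-total * PySem.Int.powMod w' 9 11) 11
    if d = 10 then "X" else PySem.Int.toStr d

def fix_code_alt (isbn : String) : String :=
  let total := (((PySem.List.enumerate isbn.toList 0).filter (fun p => p.2 != '?')).map
      (fun p => (if p.2 = 'X' then (10 : Int) else (PySem.Int.ofChars? [p.2]).getD 0) * (10 - p.1))).sum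
  let missing_index := PySem.Str.rfind isbn "?"
  if missing_index = -1 then ""
  else pvBSolve total (10 - missing_index)

-- ===== PRECONDITION & SPEC =====
-- Pre_ excludes exactly the strings containing a character other than a decimal digit,
-- the check letter X or the placeholder question mark: there Python A raises ValueError in int(char).
def Pre_fix_code (isbn : String) : Prop :=
  (isbn.toList.all (fun c => c.isDigit || c == 'X' || c == '?')) = true
instance (isbn : String) : Decidable (Pre_fix_code isbn) := by unfold Pre_fix_code; infer_instance

def pvWitness_fix_code : String := "04?31"

def Spec_fix_code (isbn : String) (out : String) : Prop := out = fix_code_alt isbn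
instance (isbn : String) (out : String) : Decidable (Spec_fix_code isbn out) := by unfold Spec_fix_code; infer_instance

-- ===== CLAIM (what is proved, stated in full; the proofs are below) =====
def Claim_equal_fix_code : Prop := ∀ (isbn : String), Dom_fix_code isbn → Pre_fix_code isbn → Spec_fix_code isbn (fix_code isbn)

-- ===== LEMMAS AND PROOFS =====

-- index (as Int) of the LAST '?' in cs, -1 if none (proof-side reference function)
def pvLastQ : List Char → Int
  | [] => -1
  | c :: cs => if pvLastQ cs = -1 then (if c = '?' then 0 else -1) else pvLastQ cs + 1

theorem pvLastQ_ge (cs : List Char) : -1 ≤ pvLastQ cs := by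
  induction cs with
  | nil => simp [pvLastQ]
  | cons c cs ih => simp only [pvLastQ]; split_ifs <;> omega

-- A's scan loop = (B's sum, last-'?'-index)
theorem pvFoldA_eq (cs : List Char) : ∀ (s t m : Int),
    (PySem.List.enumerate cs s).foldl pvAStep (t, m)
    = (t + (((PySem.List.enumerate cs s).filter (fun p => p.2 != '?')).map
          (fun p => (if p.2 = 'X' then (10 : Int) else (PySem.Int.ofChars? [p.2]).getD 0) * (10 - p.1))).sum,
       if pvLastQ cs = -1 then m else s + pvLastQ cs) := by
  induction cs with
  | nil => intro s t m; simp [PySem.List.enumerate_nil, pvLastQ]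
  | cons c cs ih =>
    intro s t m
    rw [PySem.List.enumerate_cons, List.foldl_cons, List.filter_cons]
    have hge := pvLastQ_ge cs
    by_cases hc : c = '?'
    · subst hc
      have hstep : pvAStep (t, m) ((s : Int), '?') = (t, s) := by simp [pvAStep]
      have hf : (('?' : Char) != '?') = false := by decide
      rw [hstep, ih (s + 1) t s, hf]
      simp only [Bool.false_eq_true, if_false]
      refine Prod.ext rfl ?_
      rw [show pvLastQ ('?' :: cs)
          = if pvLastQ cs = -1 then (if ('?' : Char) = '?' then 0 else -1) else pvLastQ cs + 1
          from rfl, if_pos (rfl : ('?' : Char) = '?')]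
      by_cases hq : pvLastQ cs = -1
      · simp only [if_pos hq]; norm_num
      · simp only [if_neg hq]
        rw [if_neg (show ¬(pvLastQ cs + 1 = -1) by omega)]
        omega
    · have hstep : pvAStep (t, m) ((s : Int), c)
          = (t + (if c = 'X' then (10 : Int) else (PySem.Int.ofChars? [c]).getD 0) * (10 - s), m) := by
        simp [pvAStep, hc]
      have hf : (c != '?') = true := by simpa using hc
      rw [hstep, ih (s + 1) _ m, hf]
      simp only [List.map_cons, List.sum_cons]
      refine Prod.ext (add_assoc _ _ _) ?_
      rw [show pvLastQ (c :: cs)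
          = if pvLastQ cs = -1 then (if c = '?' then 0 else -1) else pvLastQ cs + 1
          from rfl, if_neg hc]
      by_cases hq : pvLastQ cs = -1
      · simp only [if_pos hq]; norm_num
      · simp only [if_neg hq]
        rw [if_neg (show ¬(pvLastQ cs + 1 = -1) by omega)]
        omega

theorem pvSingleton_isPrefixOf (l : List Char) :
    (['?'].isPrefixOf l) = true ↔ l.head? = some '?' := by
  cases l with
  | nil => simp [List.isPrefixOf]
  | cons a l =>
    simp only [List.isPrefixOf_cons₂, List.isPrefixOf_nil_left, Bool.and_true, List.head?_cons,
      Option.some_inj, beq_iff_eq]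
    exact eq_comm

theorem pvLastQ_append (xs : List Char) (c : Char) :
    pvLastQ (xs ++ [c]) = if c = '?' then (xs.length : Int) else pvLastQ xs := by
  induction xs with
  | nil => simp [pvLastQ]
  | cons x xs ih =>
    have hge := pvLastQ_ge xs
    rw [List.cons_append,
      show pvLastQ (x :: (xs ++ [c]))
        = if pvLastQ (xs ++ [c]) = -1 then (if x = '?' then 0 else -1) else pvLastQ (xs ++ [c]) + 1
        from rfl, ih,
      show pvLastQ (x :: xs)
        = if pvLastQ xs = -1 then (if x = '?' then 0 else -1) else pvLastQ xs + 1 from rfl]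
    by_cases hc : c = '?'
    · simp only [if_pos hc, List.length_cons]
      push_cast
      omega
    · simp only [if_neg hc]

theorem pvRfind_go_eq (cs : List Char) : ∀ (k : Nat), k ≤ cs.length →
    PySem.Chars.rfind.go cs ['?'] k = pvLastQ (cs.take (k + 1)) := by
  intro k
  induction k with
  | zero =>
    intro _
    cases cs with
    | nil => rfl
    | cons a l =>
      have h0 : PySem.Chars.rfind.go (a :: l) ['?'] 0
          = if ['?'].isPrefixOf (a :: l) then (0 : Int) else -1 := rfl
      have hone : pvLastQ [a] = if a = '?' then 0 else -1 := by
        rw [show pvLastQ [a]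
            = if pvLastQ [] = -1 then (if a = '?' then 0 else -1) else pvLastQ [] + 1 from rfl]
        norm_num [pvLastQ]
      have hp := pvSingleton_isPrefixOf (a :: l)
      simp only [List.head?_cons, Option.some_inj] at hp
      rw [h0, List.take_succ_cons, List.take_zero, hone]
      by_cases ha : a = '?'
      · rw [if_pos (hp.mpr ha), if_pos ha]
      · rw [if_neg (fun hb => ha (hp.mp hb)), if_neg ha]
  | succ j ihj =>
    intro hk
    have hgo : PySem.Chars.rfind.go cs ['?'] (j + 1)
        = if ['?'].isPrefixOf (cs.drop (j + 1)) then (((j + 1 : Nat) : Int)) else PySem.Chars.rfind.go cs ['?'] j := rfl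
    rw [hgo, List.take_add_one, ihj (by omega)]
    by_cases hlt : j + 1 < cs.length
    · have hget : cs[j + 1]? = some cs[j + 1] := List.getElem?_eq_getElem hlt
      have hpre : (['?'].isPrefixOf (cs.drop (j + 1))) = true ↔ cs[j + 1] = '?' := by
        rw [pvSingleton_isPrefixOf, List.head?_drop, hget, Option.some_inj]
      rw [hget]
      simp only [Option.toList_some]
      rw [pvLastQ_append]
      have hlen : ((cs.take (j + 1)).length : Int) = (j : Int) + 1 := by
        simp [List.length_take, Nat.min_eq_left (by omega : j + 1 ≤ cs.length)]
      by_cases hq : cs[j + 1] = '?'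
      · rw [if_pos ((hpre.mpr hq)), if_pos hq, hlen]
        push_cast
        ring
      · rw [if_neg (by simp [hpre, hq]), if_neg hq]
    · have hlen : cs.length = j + 1 := by omega
      have hdrop : cs.drop (j + 1) = [] := List.drop_eq_nil_of_le (by omega)
      have hget : cs[j + 1]? = none := List.getElem?_eq_none (by omega)
      rw [hget, hdrop]
      simp [List.isPrefixOf]

theorem pvRfind_eq (cs : List Char) : PySem.Chars.rfind cs ['?'] = pvLastQ cs := by
  rw [PySem.Chars.rfind, pvRfind_go_eq cs cs.length (le_refl _), List.take_of_length_le (by omega)]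

-- both sides of the search depend only on the residues mod 11
theorem pvASearch_reduce (t w : Int) (l : List Int) :
    pvASearch t w l = pvASearch (t % 11) (w % 11) l := by
  induction l with
  | nil => rfl
  | cons d rest ih =>
    have h1 : t % 11 ≡ t [ZMOD 11] := Int.emod_emod_of_dvd t dvd_rfl
    have h2 : w % 11 ≡ w [ZMOD 11] := Int.emod_emod_of_dvd w dvd_rfl
    have hcond : (t + d * w) % 11 = (t % 11 + d * (w % 11)) % 11 := (h1.add (h2.mul_left d)).symm
    simp only [pvASearch, PySem.Int.mod_eq_emod_of_pos (by norm_num : (0:Int) < 11), hcond, ih]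

theorem pvBSolve_reduce (t w : Int) :
    pvBSolve t w = pvBSolve (t % 11) (w % 11) := by
  have h1 : t % 11 ≡ t [ZMOD 11] := Int.emod_emod_of_dvd t dvd_rfl
  simp only [pvBSolve, PySem.Int.mod_eq_emod_of_pos (by norm_num : (0:Int) < 11),
    Int.emod_emod_of_dvd w dvd_rfl, Int.emod_emod_of_dvd t dvd_rfl]
  have hd : (-t * PySem.Int.powMod (w % 11) 9 11) % 11
      = (-(t % 11) * PySem.Int.powMod (w % 11) 9 11) % 11 := (h1.neg.mul_right _).symm
  rw [hd]

theorem pvCore : ∀ t u : Int, 0 ≤ t → t < 11 → 0 ≤ u → u < 11 →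
    pvASearch t u (PySem.List.pyRange 0 11 1) = pvBSolve t u := by
  intro t u h1 h2 h3 h4
  interval_cases t <;> interval_cases u <;> decide

-- A's brute-force search = B's direct solve
theorem pvSearch_eq (total w : Int) :
    pvASearch total w (PySem.List.pyRange 0 11 1) = pvBSolve total w := by
  rw [pvASearch_reduce, pvBSolve_reduce]
  exact pvCore _ _ (Int.emod_nonneg _ (by norm_num)) (Int.emod_lt_of_pos _ (by norm_num))
    (Int.emod_nonneg _ (by norm_num)) (Int.emod_lt_of_pos _ (by norm_num))

-- ===== VERDICT (by name: the statement is the Claim_ definition above) =====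
theorem fix_code_spec : Claim_equal_fix_code := by
  intro isbn _ _
  unfold Spec_fix_code
  simp only [fix_code, fix_code_alt]
  rw [pvFoldA_eq isbn.toList 0 0 (-1)]
  rw [PySem.Str.rfind_eq, show ("?" : String).toList = ['?'] from rfl, pvRfind_eq]
  by_cases h : pvLastQ isbn.toList = -1
  · simp [h]
  · simp only [if_neg h, zero_add]
    exact pvSearch_eq _ _
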